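-- pv_equiv track=rewrite | github.com/juwonk1018/Algorithm | 프로그래머스/lv3/12987. 숫자 게임/숫자 게임.py | solution
-- ===== SOURCE A (Python) =====
-- def solution(A, B):
--     B.sort()
--     cur = 0; n = len(B)
--     answer = 0
--
--     for a in sorted(A):
--         if(cur >= n):
--             break
--
--         while(cur < n-1 and B[cur] <= a):
--             cur += 1
--
--         if(B[cur] > a):
--             answer += 1
--             cur += 1
--
--     return answer
-- ===== SOURCE B (Python) =====
-- def solution(A, B):
--     # Like A, sorts B in place; A is not mutated.
--     B.sort()
--     A_sorted = sorted(A)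
--     idx = 0
--     wins = 0
--     for b in B:
--         if idx < len(A_sorted) and b > A_sorted[idx]:
--             wins += 1
--             idx += 1
--     return wins
-- ===== Notes on version B (the rewrite author's own statement) =====
-- stated objective: simpler
-- what changed: The loop is driven by sorted B with a single pointer into sorted(A) and one if, instead of A's loop over sorted(A) with a break, an inner skip-while and an n-1 index cap.
import Mathlib
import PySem

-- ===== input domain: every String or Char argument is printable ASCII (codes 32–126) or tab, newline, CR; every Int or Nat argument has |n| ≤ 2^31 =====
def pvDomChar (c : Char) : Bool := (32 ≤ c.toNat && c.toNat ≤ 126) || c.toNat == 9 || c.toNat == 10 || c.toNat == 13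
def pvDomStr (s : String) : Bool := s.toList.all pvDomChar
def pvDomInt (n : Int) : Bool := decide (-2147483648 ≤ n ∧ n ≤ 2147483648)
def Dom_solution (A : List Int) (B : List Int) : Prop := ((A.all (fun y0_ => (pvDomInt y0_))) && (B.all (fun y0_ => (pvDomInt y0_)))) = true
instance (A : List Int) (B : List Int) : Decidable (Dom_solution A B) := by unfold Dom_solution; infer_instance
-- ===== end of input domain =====

-- B replaces A's loop over sorted(A) (with break, inner skip-while and n-1 cap) by a single-if
-- loop over sorted B with one pointer into sorted(A); same return value. Both Pythons sort B in
-- place (the equivalence proved here is about the return value; B performs the same mutation).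

-- ===== PORT A =====
-- the inner 'while cur < n-1 and B[cur] <= a: cur += 1' loop
def pySkip (Bs : List Int) (a : Int) (cur : Nat) : Nat :=
  if h : cur < Bs.length - 1 ∧ Bs.getD cur 0 ≤ a then pySkip Bs a (cur + 1) else cur
termination_by Bs.length - cur
decreasing_by omega

-- the 'for a in sorted(A)' loop; state = (cur, answer); 'break' returns answer.
-- B[cur] is always accessed with 0 ≤ cur < n in Python, so getD with default 0 is exact.
def loopA (Bs : List Int) (n : Nat) : List Int → Nat → Int → Int
  | [], _, ans => ans
  | a :: rest, cur, ans =>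
    if cur ≥ n then ans
    else
      let cur2 := pySkip Bs a cur
      if Bs.getD cur2 0 > a then loopA Bs n rest (cur2 + 1) (ans + 1)
      else loopA Bs n rest cur2 ans

def solution (A : List Int) (B : List Int) : Int :=
  let Bs := PySem.List.sorted B (fun x => x) false   -- B.sort()
  loopA Bs Bs.length (PySem.List.sorted A (fun x => x) false) 0 0

-- ===== PORT B =====
-- the 'for b in B' loop of Source B; A_sorted[idx] is guarded by idx < len(A_sorted), so getD is exact.
def loopB (As : List Int) : List Int → Nat → Int → Int
  | [], _, cnt => cnt
  | b :: rest, idx, cnt =>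
    if idx < As.length ∧ b > As.getD idx 0 then loopB As rest (idx + 1) (cnt + 1)
    else loopB As rest idx cnt

def solution_alt (A : List Int) (B : List Int) : Int :=
  let Bs := PySem.List.sorted B (fun x => x) false   -- B.sort()
  let As := PySem.List.sorted A (fun x => x) false   -- sorted(A)
  loopB As Bs 0 0

-- ===== PRECONDITION & SPEC =====
def Spec_solution (A : List Int) (B : List Int) (out : Int) : Prop := out = solution_alt A B
instance (A : List Int) (B : List Int) (out : Int) : Decidable (Spec_solution A B out) := by unfold Spec_solution; infer_instance

-- ===== CLAIM (what is proved, stated in full; the proofs are below) =====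
def Claim_equal_solution : Prop := ∀ (A : List Int) (B : List Int), Dom_solution A B → Spec_solution A B (solution A B)

-- ===== LEMMAS AND PROOFS =====

-- head-to-head greedy count over two ascending lists: drop b's ≤ a, pair a with the first b > a
def mc : List Int → List Int → Int
  | _, [] => 0
  | [], _ :: _ => 0
  | a :: as, b :: bs => if b ≤ a then mc (a :: as) bs else 1 + mc as bs
termination_by xs ys => xs.length + ys.length

theorem mc_cons (a : Int) (as : List Int) (b : Int) (bs : List Int) :
    mc (a :: as) (b :: bs) = if b ≤ a then mc (a :: as) bs else 1 + mc as bs := by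
  rw [mc]

theorem mc_nil_right (xs : List Int) : mc xs [] = 0 := by cases xs <;> simp [mc]

theorem mc_nil_left (bs : List Int) : mc [] bs = 0 := by cases bs <;> simp [mc]

theorem mc_singleton (as : List Int) (b : Int) (h : ∀ x ∈ as, b ≤ x) : mc as [b] = 0 := by
  cases as with
  | nil => simp [mc]
  | cons a t => rw [mc_cons, if_pos (h a (by simp))]; exact mc_nil_right _

theorem pySkip_not (Bs : List Int) (a : Int) (cur : Nat) :
    ¬ (pySkip Bs a cur < Bs.length - 1 ∧ Bs.getD (pySkip Bs a cur) 0 ≤ a) := by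
  rw [pySkip]
  split
  · exact pySkip_not Bs a (cur + 1)
  · assumption
termination_by Bs.length - cur
decreasing_by omega

theorem pySkip_lt (Bs : List Int) (a : Int) (cur : Nat) (h : cur < Bs.length) :
    pySkip Bs a cur < Bs.length := by
  rw [pySkip]
  split
  · exact pySkip_lt Bs a (cur + 1) (by omega)
  · exact h
termination_by Bs.length - cur
decreasing_by omega

theorem skip_mc (Bs : List Int) (a : Int) (as : List Int) (cur : Nat) :
    mc (a :: as) (Bs.drop (pySkip Bs a cur)) = mc (a :: as) (Bs.drop cur) := by
  rw [pySkip]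
  split
  · rename_i h
    have hlt : cur < Bs.length := by omega
    rw [skip_mc Bs a as (cur + 1), List.drop_eq_getElem_cons hlt]
    have hb : Bs[cur] ≤ a := by
      have := h.2; rwa [List.getD_eq_getElem Bs 0 hlt] at this
    rw [mc_cons, if_pos hb]
  · rfl
termination_by Bs.length - cur
decreasing_by omega

theorem loopA_mc (Bs : List Int) :
    ∀ (As : List Int) (cur : Nat) (ans : Int), As.Pairwise (· ≤ ·) →
      loopA Bs Bs.length As cur ans = ans + mc As (Bs.drop cur) := by
  intro As
  induction As with
  | nil => intro cur ans _; simp [loopA, mc_nil_left]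
  | cons a as ih =>
    intro cur ans hp
    by_cases hge : cur ≥ Bs.length
    · simp [loopA, hge, List.drop_eq_nil_of_le hge, mc_nil_right]
    · have hlt : cur < Bs.length := by omega
      have hr := pySkip_lt Bs a cur hlt
      have hdrop := List.drop_eq_getElem_cons hr (l := Bs)
      have hget : Bs.getD (pySkip Bs a cur) 0 = Bs[pySkip Bs a cur] :=
        List.getD_eq_getElem Bs 0 hr
      simp only [loopA, hge, if_false]
      rw [← skip_mc Bs a as cur]
      by_cases hg : Bs.getD (pySkip Bs a cur) 0 > a
      · rw [if_pos hg, ih _ _ hp.tail, hdrop]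
        have : ¬ Bs[pySkip Bs a cur] ≤ a := by rw [← hget]; omega
        rw [mc_cons, if_neg this]
        ring
      · rw [if_neg hg, ih _ _ hp.tail]
        have hend : pySkip Bs a cur = Bs.length - 1 := by
          have := pySkip_not Bs a cur
          by_cases h1 : pySkip Bs a cur < Bs.length - 1
          · exact absurd ⟨h1, by rw [hget]; omega⟩ this
          · omega
        have hnil : Bs.drop (pySkip Bs a cur + 1) = [] :=
          List.drop_eq_nil_of_le (by omega)
        have hba : Bs[pySkip Bs a cur] ≤ a := by rw [← hget]; omega
        rw [hdrop, hnil]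
        have h1 : mc (a :: as) [Bs[pySkip Bs a cur]] = 0 := by
          rw [mc_cons, if_pos hba]; exact mc_nil_right _
        have h2 : mc as [Bs[pySkip Bs a cur]] = 0 :=
          mc_singleton as _ (fun x hx => le_trans hba (List.rel_of_pairwise_cons hp hx))
        rw [h1, h2]

theorem loopB_mc (As : List Int) :
    ∀ (Bs : List Int) (idx : Nat) (cnt : Int),
      loopB As Bs idx cnt = cnt + mc (As.drop idx) Bs := by
  intro Bs
  induction Bs with
  | nil => intro idx cnt; simp [loopB, mc_nil_right]
  | cons b bs ih =>
    intro idx cnt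
    by_cases hge : idx ≥ As.length
    · have hnil : As.drop idx = [] := List.drop_eq_nil_of_le hge
      simp [loopB, hnil, mc_nil_left, ih, Nat.not_lt.mpr hge]
    · have hlt : idx < As.length := by omega
      have hdrop := List.drop_eq_getElem_cons hlt (l := As)
      have hget : As.getD idx 0 = As[idx] := List.getD_eq_getElem As 0 hlt
      by_cases hb : b > As.getD idx 0
      · rw [loopB, if_pos ⟨hlt, hb⟩, ih, hdrop]
        have : ¬ b ≤ As[idx] := by rw [← hget]; omega
        rw [mc_cons, if_neg this]
        ring
      · rw [loopB, if_neg (by tauto), ih, hdrop]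
        have : b ≤ As[idx] := by rw [← hget]; omega
        rw [mc_cons, if_pos this]

-- ===== VERDICT (by name: the statement is the Claim_ definition above) =====
theorem solution_spec : Claim_equal_solution := by
  intro A B _
  unfold Spec_solution solution solution_alt
  have hp : (PySem.List.sorted A (fun x => x) false).Pairwise (· ≤ ·) :=
    PySem.List.sorted_pairwise A (fun x => x)
  rw [loopA_mc _ _ _ _ hp, loopB_mc]
  simp
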